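-- pv_equiv track=rewrite | github.com/BaptisteLetulzeau/personalDev | python/epitech-pool/pre_pool_day_9.py | choose_letter
-- ===== SOURCE A (Python) =====
-- from collections import Counter
--
-- def choose_letter(possible_words, proposed_letters):
--     """IA choose a letter"""
--     # Concatenate all possible remaining words
--     concatenated_words = ''.join(possible_words)
--
--     # Filter out already proposed letters
--     remaining_letters = [letter for letter in concatenated_words if letter.upper() not in proposed_letters]
--
--     # Count occurrences of the remaining letters
--     letter_count = Counter(remaining_letters)
--
--     # Find the most frequent letter
--     if letter_count:
--         return max(letter_count, key=letter_count.get).upper()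
--     else:
--         return None
-- ===== SOURCE B (Python) =====
-- def choose_letter(possible_words, proposed_letters):
--     """IA choose a letter: brute-force argmax without any counting table.
--     Walk the filtered letter sequence; at each first occurrence of a letter,
--     count its occurrences with list.count and keep the running best under
--     a strict improvement rule (preserves first-appearance tie-breaking)."""
--     text = ''.join(possible_words)
--     letters = [c for c in text if c.upper() not in proposed_letters]
--     best = None
--     best_count = 0
--     seen = []
--     for c in letters:
--         if c in seen:
--             continue
--         seen.append(c)
--         n = letters.count(c)
--         if n > best_count:
--             best = c
--             best_count = n
--     return best.upper() if best is not None else None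
-- ===== Notes on version B (the rewrite author's own statement) =====
-- stated objective: alternative
-- what changed: Drops the Counter/dict entirely: B walks the filtered letters, and at each first occurrence counts that letter with list.count while keeping a running argmax under strict improvement, instead of building a frequency table and taking a keyed max over it.
import Mathlib
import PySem

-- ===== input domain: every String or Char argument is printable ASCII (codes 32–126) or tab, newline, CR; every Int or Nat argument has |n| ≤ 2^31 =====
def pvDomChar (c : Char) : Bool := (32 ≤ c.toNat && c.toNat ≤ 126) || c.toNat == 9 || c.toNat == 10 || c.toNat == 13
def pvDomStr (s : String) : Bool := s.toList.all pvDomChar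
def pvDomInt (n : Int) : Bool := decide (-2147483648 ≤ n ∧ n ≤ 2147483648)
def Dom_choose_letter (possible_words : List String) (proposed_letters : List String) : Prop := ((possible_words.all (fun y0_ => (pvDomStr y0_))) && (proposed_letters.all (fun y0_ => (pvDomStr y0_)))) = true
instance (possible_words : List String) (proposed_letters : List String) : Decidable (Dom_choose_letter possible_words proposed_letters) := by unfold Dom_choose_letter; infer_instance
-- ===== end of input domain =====

-- B drops the Counter/keyed-max pair: it brute-forces the argmax, counting each
-- first-seen letter with list.count and keeping a strict-improvement running best.


-- ===== PORT A =====
def choose_letter (possible_words : List String) (proposed_letters : List String) : Option String :=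
  let concatenated_words := PySem.Str.join "" possible_words
  let remaining_letters := concatenated_words.toList.filter
    (fun letter => !(proposed_letters.contains (PySem.Str.upper (String.mk [letter]))))
  let letter_count := PySem.Dict.counter remaining_letters
  if !letter_count.items.isEmpty then
    (PySem.List.max? letter_count.keys (fun k => letter_count.getD k 0)).map
      (fun c => PySem.Str.upper (String.mk [c]))
  else
    none

-- ===== PORT B =====
def choose_letter_alt (possible_words : List String) (proposed_letters : List String) : Option String :=
  let text := PySem.Str.join "" possible_words
  let letters := text.toList.filter
    (fun c => !(proposed_letters.contains (PySem.Str.upper (String.mk [c]))))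
  let st := letters.foldl
    (fun (st : Option Char × Int × List Char) c =>
      if st.2.2.contains c then st
      else if ((letters.count c : Int)) > st.2.1 then (some c, (letters.count c : Int), st.2.2 ++ [c])
      else (st.1, st.2.1, st.2.2 ++ [c])) (none, 0, [])
  st.1.map (fun c => PySem.Str.upper (String.mk [c]))

-- ===== PRECONDITION & SPEC =====
def Spec_choose_letter (possible_words : List String) (proposed_letters : List String) (out : Option String) : Prop := out = choose_letter_alt possible_words proposed_letters
instance (possible_words : List String) (proposed_letters : List String) (out : Option String) : Decidable (Spec_choose_letter possible_words proposed_letters out) := by unfold Spec_choose_letter; infer_instance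

-- ===== CLAIM (what is proved, stated in full; the proofs are below) =====
def Claim_equal_choose_letter : Prop := ∀ (possible_words : List String) (proposed_letters : List String), Dom_choose_letter possible_words proposed_letters → Spec_choose_letter possible_words proposed_letters (choose_letter possible_words proposed_letters)

-- ===== LEMMAS AND PROOFS =====

-- the running-max step of PySem.List.max?, started from a seed
theorem max?_cons_eq {α : Type} (x : α) (t : List α) (key : α → Int) :
    PySem.List.max? (x :: t) key =
      some (t.foldl (fun m y => if key m < key y then y else m) x) := by
  show List.foldl _ none (x :: t) = _
  simp only [List.foldl_cons]
  induction t generalizing x with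
  | nil => rfl
  | cons y t ih =>
    simp only [List.foldl_cons]
    by_cases h : key x < key y <;> simp only [h, if_pos, ite_false] <;> exact ih _

-- the seen-set only grows along the fold
theorem prefix_foldl_add (L : List Char) : ∀ s : List Char, s <+: List.foldl PySem.Set.add s L := by
  induction L with
  | nil => intro s; exact List.prefix_refl s
  | cons c L ih =>
    intro s
    refine List.IsPrefix.trans ?_ (ih (PySem.Set.add s c))
    simp only [PySem.Set.add, PySem.Set.contains_eq_listContains]
    split
    · exact List.prefix_refl s
    · exact ⟨[c], rfl⟩

-- the letters of L not already in s, in first-appearance order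
def newDistinct (s : List Char) : List Char → List Char
  | [] => []
  | c :: L => if s.contains c then newDistinct s L else c :: newDistinct (s ++ [c]) L

theorem newDistinct_eq_drop (L : List Char) :
    ∀ s : List Char, newDistinct s L = (List.foldl PySem.Set.add s L).drop s.length := by
  induction L with
  | nil => intro s; simp [newDistinct]
  | cons c L ih =>
    intro s
    simp only [newDistinct, List.foldl_cons]
    by_cases h : s.contains c
    · have hm : c ∈ s := by simpa using h
      have ha : PySem.Set.add s c = s := by
        simp [PySem.Set.add, PySem.Set.contains_eq_listContains, hm]
      rw [if_pos h, ha, ih]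
    · have hm : c ∉ s := by simpa using h
      have ha : PySem.Set.add s c = s ++ [c] := by
        simp [PySem.Set.add, PySem.Set.contains_eq_listContains, hm]
      rw [if_neg h, ha, ih (s ++ [c])]
      obtain ⟨t, ht⟩ := prefix_foldl_add L (s ++ [c])
      rw [← ht]
      have h1 : ((s ++ [c]) ++ t).drop (s ++ [c]).length = t := List.drop_left
      have h2 : ((s ++ [c]) ++ t).drop s.length = c :: t := by
        rw [List.append_assoc]
        exact List.drop_left
      rw [h1, h2]

-- B's skip-if-seen loop collapses to a plain argmax fold over the fresh letters
theorem loopB_eq (key : Char → Int) (L : List Char) :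
    ∀ (b : Option Char) (n : Int) (s : List Char),
    L.foldl (fun (st : Option Char × Int × List Char) c =>
        if st.2.2.contains c then st
        else if key c > st.2.1 then (some c, key c, st.2.2 ++ [c])
        else (st.1, st.2.1, st.2.2 ++ [c])) (b, n, s)
    = (((newDistinct s L).foldl (fun (p : Option Char × Int) c =>
          if key c > p.2 then (some c, key c) else p) (b, n)).1,
       ((newDistinct s L).foldl (fun (p : Option Char × Int) c =>
          if key c > p.2 then (some c, key c) else p) (b, n)).2,
       List.foldl PySem.Set.add s L) := by
  induction L with
  | nil => intro b n s; rfl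
  | cons c L ih =>
    intro b n s
    simp only [List.foldl_cons, newDistinct]
    by_cases h : s.contains c
    · have hm : c ∈ s := by simpa using h
      have ha : PySem.Set.add s c = s := by
        simp [PySem.Set.add, PySem.Set.contains_eq_listContains, hm]
      rw [if_pos h, if_pos h, ha]
      exact ih b n s
    · have hm : c ∉ s := by simpa using h
      have ha : PySem.Set.add s c = s ++ [c] := by
        simp [PySem.Set.add, PySem.Set.contains_eq_listContains, hm]
      rw [if_neg h, if_neg h, ha]
      simp only [List.foldl_cons]
      by_cases hk : key c > n
      · rw [if_pos hk, if_pos hk]; exact ih (some c) (key c) (s ++ [c])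
      · rw [if_neg hk, if_neg hk]; exact ih b n (s ++ [c])

-- once the best slot is occupied with its own key, the argmax fold is max?'s running-max fold
theorem step2_from_some (key : Char → Int) (t : List Char) :
    ∀ m : Char,
    t.foldl (fun (p : Option Char × Int) c => if key c > p.2 then (some c, key c) else p)
        (some m, key m)
      = (some (t.foldl (fun m y => if key m < key y then y else m) m),
         key (t.foldl (fun m y => if key m < key y then y else m) m)) := by
  induction t with
  | nil => intro m; rfl
  | cons y t ih =>
    intro m
    simp only [List.foldl_cons]
    by_cases h : key m < key y
    · rw [if_pos h, if_pos h]; exact ih y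
    · rw [if_neg h, if_neg h]; exact ih m

theorem set_ofList_eq_nil_iff (L : List Char) : PySem.Set.ofList L = [] ↔ L = [] := by
  constructor
  · intro h
    cases L with
    | nil => rfl
    | cons c L =>
      exfalso
      have : c ∈ PySem.Set.ofList (c :: L) := by
        rw [PySem.Set.mem_ofList]; simp
      rw [h] at this; simp at this
  · intro h; subst h; rfl

-- ===== VERDICT (by name: the statement is the Claim_ definition above) =====
theorem choose_letter_spec : Claim_equal_choose_letter := by
  intro pw ps _
  show choose_letter pw ps = choose_letter_alt pw ps
  simp only [choose_letter, choose_letter_alt]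
  set L := (PySem.Str.join "" pw).toList.filter
      (fun c => !(ps.contains (PySem.Str.upper (String.mk [c])))) with hL
  set key : Char → Int := fun c => ((L.count c : Int)) with hkey
  rw [loopB_eq key L none 0 []]
  have hnd : newDistinct [] L = PySem.Set.ofList L := by
    rw [newDistinct_eq_drop, PySem.Set.ofList_eq_foldl]; rfl
  rw [hnd]
  have hkeyeq : (fun k => (PySem.Dict.counter L).getD k 0) = key := by
    funext k; rw [hkey]; exact PySem.Dict.getD_counter L k
  have hitems := PySem.Dict.items_counter (κ := Char) L
  have hkeys := PySem.Dict.keys_counter (κ := Char) L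
  cases hS : PySem.Set.ofList L with
  | nil =>
    have hLnil : L = [] := (set_ofList_eq_nil_iff L).mp hS
    rw [hitems, hS]
    simp
  | cons a D =>
    have hLne : L ≠ [] := by
      intro h; rw [(set_ofList_eq_nil_iff L).mpr h] at hS; simp at hS
    have hempty : (PySem.Dict.counter L).items.isEmpty = false := by
      rw [hitems, hS]; simp
    rw [hempty]
    simp only [Bool.not_false, if_true]
    rw [hkeys, hkeyeq, hS]
    have hamem : a ∈ L := by
      have : a ∈ PySem.Set.ofList L := by rw [hS]; simp
      exact (PySem.Set.mem_ofList L a).mp this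
    have hpos : key a > 0 := by
      show (0 : Int) < ((L.count a : Nat) : Int)
      have : 0 < L.count a := List.count_pos_iff.mpr hamem
      exact_mod_cast this
    rw [max?_cons_eq a D key]
    simp only [List.foldl_cons]
    rw [if_pos hpos, step2_from_some key D a]
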